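-- pv_equiv track=rewrite | github.com/naibarn/SmartSpecPro | python-backend/app/orchestrator/lcel_chains.py | format_semantic_context
-- ===== SOURCE A (Python) =====
-- from typing import Optional, Dict, Any, List, AsyncIterator, Callable
--
-- def format_semantic_context(context: Optional[Dict[str, Any]]) -> str:
--     """Format semantic memory context for prompt."""
--     if not context:
--         return ""
--
--     parts = []
--
--     if context.get("preferences"):
--         parts.append("## User Preferences")
--         for pref in context["preferences"][:5]:
--             parts.append(f"- {pref.get('content', '')}")
--
--     if context.get("facts"):
--         parts.append("\n## Project Facts")
--         for fact in context["facts"][:5]: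
--             parts.append(f"- {fact.get('content', '')}")
--
--     if context.get("skills"):
--         parts.append("\n## Available Skills")
--         for skill in context["skills"][:5]:
--             parts.append(f"- {skill.get('content', '')}")
--
--     if context.get("rules"):
--         parts.append("\n## Rules & Constraints")
--         for rule in context["rules"][:5]:
--             parts.append(f"- {rule.get('content', '')}")
--
--     return "\n".join(parts) if parts else ""
-- ===== SOURCE B (Python) =====
-- _SECTIONS = [
--     ("preferences", "## User Preferences"),
--     ("facts", "\n## Project Facts"),
--     ("skills", "\n## Available Skills"),
--     ("rules", "\n## Rules & Constraints"),
-- ]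
--
--
-- def _render(context, sections):
--     """Recursively render the section table back-to-front into one string."""
--     if not sections:
--         return ""
--     (key, title), rest_sections = sections[0], sections[1:]
--     rest = _render(context, rest_sections)
--     items = context.get(key)
--     if not items:
--         return rest
--     block = title + "".join("\n- " + item.get("content", "") for item in items[:5])
--     return block if not rest else block + "\n" + rest
--
--
-- def format_semantic_context(context):
--     """Format semantic memory context for prompt."""
--     if not context:
--         return ""
--     return _render(context, _SECTIONS)
-- ===== Notes on version B (the rewrite author's own statement) =====
-- stated objective: alternative
-- what changed: Replaces A's four copy-pasted if-blocks that accumulate a parts list and finally '\n'.join it with a recursive back-to-front renderer over a (key, title) table that builds each section as one block string by direct concatenation and glues blocks together without any list or join call.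
import Mathlib
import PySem

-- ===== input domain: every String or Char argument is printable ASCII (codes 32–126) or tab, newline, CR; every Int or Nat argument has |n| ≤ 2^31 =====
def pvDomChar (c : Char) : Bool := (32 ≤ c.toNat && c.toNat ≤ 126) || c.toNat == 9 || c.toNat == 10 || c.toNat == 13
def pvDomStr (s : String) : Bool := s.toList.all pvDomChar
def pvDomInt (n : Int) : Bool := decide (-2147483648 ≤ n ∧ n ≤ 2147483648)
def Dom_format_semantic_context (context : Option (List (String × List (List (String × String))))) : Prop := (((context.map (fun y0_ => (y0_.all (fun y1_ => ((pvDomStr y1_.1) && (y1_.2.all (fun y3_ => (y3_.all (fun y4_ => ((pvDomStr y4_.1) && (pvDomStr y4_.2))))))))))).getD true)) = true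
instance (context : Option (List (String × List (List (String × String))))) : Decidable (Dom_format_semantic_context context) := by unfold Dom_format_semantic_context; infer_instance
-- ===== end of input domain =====

-- B replaces A's four copy-pasted if-blocks (accumulate a parts list, then '\n'.join it)
-- with a recursive back-to-front renderer over a (key, title) table that concatenates each
-- section into one block string and glues blocks directly, with no list and no join
-- (objective: alternative).

-- ===== PORT A =====
def format_semantic_context (context : Option (List (String × List (List (String × String))))) : String :=
  match context with
  | none => ""
  | some ctx =>
    if ctx = [] then ""   -- 'if not context' on a present dict: empty dict is falsy
    else
      let d := PySem.Dict.mk ctx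
      let parts : List String := []
      let parts := if d.getD "preferences" [] ≠ [] then
          (parts ++ ["## User Preferences"]) ++
            (PySem.List.slice (d.getD "preferences" []) none (some 5)).map
              (fun pref => "- " ++ (PySem.Dict.mk pref).getD "content" "")
        else parts
      let parts := if d.getD "facts" [] ≠ [] then
          (parts ++ ["\n## Project Facts"]) ++
            (PySem.List.slice (d.getD "facts" []) none (some 5)).map
              (fun fact => "- " ++ (PySem.Dict.mk fact).getD "content" "")
        else parts
      let parts := if d.getD "skills" [] ≠ [] then
          (parts ++ ["\n## Available Skills"]) ++
            (PySem.List.slice (d.getD "skills" []) none (some 5)).map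
              (fun skill => "- " ++ (PySem.Dict.mk skill).getD "content" "")
        else parts
      let parts := if d.getD "rules" [] ≠ [] then
          (parts ++ ["\n## Rules & Constraints"]) ++
            (PySem.List.slice (d.getD "rules" []) none (some 5)).map
              (fun rule => "- " ++ (PySem.Dict.mk rule).getD "content" "")
        else parts
      if parts ≠ [] then PySem.Str.join "\n" parts else ""

-- ===== PORT B =====
def pvSections : List (String × String) :=
  [("preferences", "## User Preferences"), ("facts", "\n## Project Facts"),
   ("skills", "\n## Available Skills"), ("rules", "\n## Rules & Constraints")]

def pvRender (d : PySem.Dict String (List (List (String × String)))) :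
    List (String × String) → String
  | [] => ""
  | kh :: restSections =>
    let rest := pvRender d restSections
    let items := d.getD kh.1 []
    if items = [] then rest
    else
      let block := kh.2 ++ PySem.Str.join ""
        ((PySem.List.slice items none (some 5)).map
          (fun item => "\n- " ++ (PySem.Dict.mk item).getD "content" ""))
      if rest = "" then block else block ++ "\n" ++ rest

def format_semantic_context_alt (context : Option (List (String × List (List (String × String))))) : String :=
  match context with
  | none => ""
  | some ctx =>
    if ctx = [] then ""
    else pvRender (PySem.Dict.mk ctx) pvSections

-- ===== PRECONDITION & SPEC =====
def Spec_format_semantic_context (context : Option (List (String × List (List (String × String))))) (out : String) : Prop := out = format_semantic_context_alt context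
instance (context : Option (List (String × List (List (String × String))))) (out : String) : Decidable (Spec_format_semantic_context context out) := by unfold Spec_format_semantic_context; infer_instance

-- ===== CLAIM (what is proved, stated in full; the proofs are below) =====
def Claim_equal_format_semantic_context : Prop := ∀ (context : Option (List (String × List (List (String × String))))), Dom_format_semantic_context context → Spec_format_semantic_context context (format_semantic_context context)

-- ===== LEMMAS AND PROOFS =====

-- the list of parts A would produce for one section
def pvSegOf (d : PySem.Dict String (List (List (String × String)))) (kh : String × String) : List String :=
  let items := d.getD kh.1 []
  if items = [] then []
  else kh.2 :: (PySem.List.slice items none (some 5)).map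
    (fun item => "- " ++ (PySem.Dict.mk item).getD "content" "")

theorem chars_join_nil_cons (x : List Char) (xs : List (List Char)) :
    PySem.Chars.join [] (x :: xs) = x ++ PySem.Chars.join [] xs := by
  cases xs with
  | nil => simp [PySem.Chars.join_singleton, PySem.Chars.join_nil]
  | cons q r => rw [PySem.Chars.join_cons_cons]; simp

theorem chars_join_head (s : List Char) :
    ∀ (t : List (List Char)) (h : List Char),
    PySem.Chars.join s (h :: t) = h ++ PySem.Chars.join [] (t.map (fun l => s ++ l)) := by
  intro t
  induction t with
  | nil => intro h; simp [PySem.Chars.join_singleton, PySem.Chars.join_nil]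
  | cons q r ih =>
    intro h
    rw [PySem.Chars.join_cons_cons, ih q]
    simp [chars_join_nil_cons, List.append_assoc]

theorem chars_join_append (s : List Char) :
    ∀ (t : List (List Char)) (h : List Char) (ys : List (List Char)),
    PySem.Chars.join s (h :: (t ++ ys)) =
      PySem.Chars.join s (h :: t) ++
        (if ys = [] then [] else s ++ PySem.Chars.join s ys) := by
  intro t
  induction t with
  | nil =>
    intro h ys
    simp only [List.nil_append]
    cases ys with
    | nil => simp [PySem.Chars.join_singleton]
    | cons y ys' => simp [PySem.Chars.join_cons_cons, PySem.Chars.join_singleton, List.append_assoc]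
  | cons q r ih =>
    intro h ys
    show PySem.Chars.join s (h :: q :: (r ++ ys)) =
      PySem.Chars.join s (h :: q :: r) ++ (if ys = [] then [] else s ++ PySem.Chars.join s ys)
    rw [PySem.Chars.join_cons_cons s h q (r ++ ys), ih q,
      PySem.Chars.join_cons_cons s h q r]
    by_cases hy : ys = [] <;> simp [hy, List.append_assoc]

theorem str_join_head (t : List String) (h : String) :
    PySem.Str.join "\n" (h :: t) = h ++ PySem.Str.join "" (t.map (fun l => "\n" ++ l)) := by
  rw [← String.toList_inj]
  simp only [PySem.Str.join, String.toList_ofList, String.toList_append, List.map_cons,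
    List.map_map]
  rw [chars_join_head]
  congr 1
  simp [Function.comp_def, String.toList_append]

theorem str_join_append (t : List String) (h : String) (ys : List String) :
    PySem.Str.join "\n" (h :: (t ++ ys)) =
      PySem.Str.join "\n" (h :: t) ++
        (if ys = [] then "" else "\n" ++ PySem.Str.join "\n" ys) := by
  rw [← String.toList_inj]
  simp only [PySem.Str.join, List.map_append, List.map_cons]
  rw [chars_join_append]
  by_cases hy : ys = []
  · simp [hy]
  · have : List.map String.toList ys ≠ [] := by simpa using hy
    simp [hy, this]

theorem str_append_ne_empty (a b : String) (ha : a ≠ "") : a ++ b ≠ "" := by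
  intro h
  apply ha
  have := congrArg String.toList h
  simp [String.toList_append] at this
  exact String.toList_inj.mp (by simp [this.1])

theorem render_spec (d : PySem.Dict String (List (List (String × String)))) :
    ∀ (sections : List (String × String)), (∀ kh ∈ sections, kh.2 ≠ "") →
    pvRender d sections = PySem.Str.join "\n" ((sections.map (pvSegOf d)).flatten) ∧
    (pvRender d sections = "" ↔ ((sections.map (pvSegOf d)).flatten : List String) = []) := by
  intro sections
  induction sections with
  | nil =>
    intro _
    exact ⟨rfl, ⟨fun _ => rfl, fun _ => rfl⟩⟩
  | cons kh rest ih =>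
    intro hhdr
    have ihr := ih (fun x hx => hhdr x (List.mem_cons_of_mem _ hx))
    by_cases hit : d.getD kh.1 [] = []
    · -- section empty: both sides reduce to the rest
      have hseg : pvSegOf d kh = [] := by simp [pvSegOf, hit]
      have hr : pvRender d (kh :: rest) = pvRender d rest := by
        simp [pvRender, hit]
      rw [hr]
      simp only [List.map_cons, List.flatten_cons, hseg, List.nil_append]
      exact ihr
    · have hhd : kh.2 ≠ "" := hhdr kh (List.mem_cons_self)
      set lines := (PySem.List.slice (d.getD kh.1 []) none (some 5)).map
        (fun item => "- " ++ (PySem.Dict.mk item).getD "content" "") with hlines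
      have hseg : pvSegOf d kh = kh.2 :: lines := by simp [pvSegOf, hit, hlines]
      have hblock : (kh.2 ++ PySem.Str.join ""
          ((PySem.List.slice (d.getD kh.1 []) none (some 5)).map
            (fun item => "\n- " ++ (PySem.Dict.mk item).getD "content" "")))
          = PySem.Str.join "\n" (kh.2 :: lines) := by
        have hmap : (PySem.List.slice (d.getD kh.1 []) none (some 5)).map
            (fun item => "\n- " ++ (PySem.Dict.mk item).getD "content" "") =
            lines.map (fun l => "\n" ++ l) := by
          rw [hlines, List.map_map]
          apply List.map_congr_left
          intro item _
          show "\n- " ++ (PySem.Dict.mk item).getD "content" "" =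
            "\n" ++ ("- " ++ (PySem.Dict.mk item).getD "content" "")
          rw [← String.append_assoc]
          rfl
        rw [hmap, str_join_head]
      have hstep : pvRender d (kh :: rest) =
          (if d.getD kh.1 [] = [] then pvRender d rest
           else if pvRender d rest = "" then
             kh.2 ++ PySem.Str.join ""
               ((PySem.List.slice (d.getD kh.1 []) none (some 5)).map
                 (fun item => "\n- " ++ (PySem.Dict.mk item).getD "content" ""))
           else (kh.2 ++ PySem.Str.join ""
               ((PySem.List.slice (d.getD kh.1 []) none (some 5)).map
                 (fun item => "\n- " ++ (PySem.Dict.mk item).getD "content" ""))) ++ "\n"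
             ++ pvRender d rest) := rfl
      have hr : pvRender d (kh :: rest) =
          (if pvRender d rest = "" then PySem.Str.join "\n" (kh.2 :: lines)
           else PySem.Str.join "\n" (kh.2 :: lines) ++ "\n" ++ pvRender d rest) := by
        rw [hstep, if_neg hit, hblock]
      constructor
      · rw [hr]
        simp only [List.map_cons, List.flatten_cons, hseg, List.cons_append]
        rw [str_join_append lines kh.2 ((rest.map (pvSegOf d)).flatten)]
        by_cases hrest : pvRender d rest = ""
        · have : ((rest.map (pvSegOf d)).flatten : List String) = [] := ihr.2.mp hrest
          simp [hrest, this]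
        · have : ¬ ((rest.map (pvSegOf d)).flatten : List String) = [] := by
            intro h; exact hrest (ihr.2.mpr h)
          rw [if_neg hrest, if_neg this, ihr.1, String.append_assoc]
      · constructor
        · intro h
          exfalso
          rw [hr] at h
          by_cases hrest : pvRender d rest = ""
          · rw [if_pos hrest, str_join_head] at h
            exact str_append_ne_empty _ _ hhd h
          · rw [if_neg hrest, str_join_head] at h
            refine str_append_ne_empty _ _ ?_ h
            refine str_append_ne_empty _ _ ?_
            exact str_append_ne_empty _ _ hhd
        · intro h
          exfalso
          simp [hseg] at h

-- A's if-block appends exactly pvSegOf for that section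
theorem step_eq (d : PySem.Dict String (List (List (String × String)))) (parts : List String) (kh : String × String) :
    (if d.getD kh.1 [] ≠ [] then
        (parts ++ [kh.2]) ++ (PySem.List.slice (d.getD kh.1 []) none (some 5)).map
          (fun item => "- " ++ (PySem.Dict.mk item).getD "content" "")
      else parts) = parts ++ pvSegOf d kh := by
  by_cases h : d.getD kh.1 [] = [] <;> simp [pvSegOf, h]

-- ===== VERDICT (by name: the statement is the Claim_ definition above) =====
theorem format_semantic_context_spec : Claim_equal_format_semantic_context := by
  intro context _
  unfold Spec_format_semantic_context format_semantic_context format_semantic_context_alt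
  cases context with
  | none => rfl
  | some ctx =>
    by_cases h : ctx = []
    · simp [h]
    · simp only [if_neg h]
      set d := PySem.Dict.mk ctx with hd
      have hhdr : ∀ kh ∈ pvSections, (kh : String × String).2 ≠ "" := by decide
      have main := render_spec d pvSections hhdr
      -- rewrite A's four chained if-blocks as appends of pvSegOf, then compare with B
      rw [step_eq d [] ("preferences", "## User Preferences"),
          step_eq d _ ("facts", "\n## Project Facts"),
          step_eq d _ ("skills", "\n## Available Skills"),
          step_eq d _ ("rules", "\n## Rules & Constraints")]
      have hflat : ([] ++ pvSegOf d ("preferences", "## User Preferences") ++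
          pvSegOf d ("facts", "\n## Project Facts") ++
          pvSegOf d ("skills", "\n## Available Skills") ++
          pvSegOf d ("rules", "\n## Rules & Constraints")) =
          ((pvSections.map (pvSegOf d)).flatten) := by
        simp [pvSections, List.append_assoc]
      rw [hflat]
      by_cases hp : ((pvSections.map (pvSegOf d)).flatten : List String) = []
      · rw [hp]
        simp only [ne_eq, not_true_eq_false, if_false]
        rw [main.1, hp]
        rfl
      · rw [if_pos hp]
        exact main.1.symm
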